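-- pv_equiv track=rewrite | github.com/jiezhu-spec/AuraCap | backend/app/services/scheduler.py | _expand_token
-- ===== SOURCE A (Python) =====
-- def _expand_token(token: str, minimum: int, maximum: int) -> set[int]:
--     values: set[int] = set()
--     if token == "*":
--         return set(range(minimum, maximum + 1))
--     for part in token.split(","):
--         p = part.strip()
--         if "/" in p:
--             base, step = p.split("/", 1)
--             step_i = int(step)
--             base_values = set(range(minimum, maximum + 1)) if base == "*" else _expand_token(base, minimum, maximum)
--             for val in sorted(base_values):
--                 if (val - minimum) % step_i == 0:
--                     values.add(val)
--             continue
--         if "-" in p: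
--             start, end = p.split("-", 1)
--             values.update(range(int(start), int(end) + 1))
--             continue
--         values.add(int(p))
--     return {v for v in values if minimum <= v <= maximum}
-- ===== SOURCE B (Python) =====
-- def _parse_bounds(b):
--     if "-" in b:
--         a, c = b.split("-", 1)
--         return (int(a), int(c))
--     return (int(b), int(b))
--
--
-- def _parse_part(p, minimum, maximum):
--     if "/" in p:
--         base, step = p.split("/", 1)
--         st = int(step)
--         if base == "*":
--             return (minimum, maximum, st)
--         lo, hi = _parse_bounds(base.strip())
--         return (lo, hi, st)
--     lo, hi = _parse_bounds(p)
--     return (lo, hi, 1)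
--
--
-- def _expand_token(token: str, minimum: int, maximum: int) -> set[int]:
--     if token == "*":
--         triples = [(minimum, maximum, 1)]
--     else:
--         triples = [_parse_part(part.strip(), minimum, maximum)
--                    for part in token.split(",")]
--     values: set[int] = set()
--     for lo, hi, st in triples:
--         for val in range(max(lo, minimum), min(hi, maximum) + 1):
--             if (val - minimum) % st == 0:
--                 values.add(val)
--     return values
-- ===== Notes on version B (the rewrite author's own statement) =====
-- stated objective: alternative
-- what changed: B replaces A's recursion-on-base, sorting of intermediate sets and final clamping filter by a two-phase pass: each comma part is parsed into a (lo, hi, step) triple, then one loop enumerates each triple over the range already clamped to [minimum, maximum], so no recursive call, no sorted() and no final set comprehension are needed.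
import Mathlib
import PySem

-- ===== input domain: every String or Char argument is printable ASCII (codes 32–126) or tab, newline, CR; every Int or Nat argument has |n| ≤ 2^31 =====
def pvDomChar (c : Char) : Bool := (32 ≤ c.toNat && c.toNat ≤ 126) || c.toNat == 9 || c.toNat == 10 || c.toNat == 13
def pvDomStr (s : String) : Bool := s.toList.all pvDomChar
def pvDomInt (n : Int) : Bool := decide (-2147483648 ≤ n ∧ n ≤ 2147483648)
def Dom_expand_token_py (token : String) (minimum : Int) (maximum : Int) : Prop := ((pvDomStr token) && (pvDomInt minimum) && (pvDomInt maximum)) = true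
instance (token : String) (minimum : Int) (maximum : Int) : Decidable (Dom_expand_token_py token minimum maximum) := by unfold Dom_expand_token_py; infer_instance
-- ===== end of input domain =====

-- B parses each comma part into a (lo, hi, step) triple and fills one clamped enumeration pass:
-- no recursion on the base, no sorted(), no final clamping filter.  Objective: alternative decomposition.

-- ===== PORT A =====
-- A works on sets of ints; a set is a PySem.Set Int (distinct elements, first-insertion order).
-- The recursion of _expand_token is made structural with a fuel argument (token length + 2 always suffices:
-- the recursion only ever goes one level deep, onto the base of a 'base/step' part).
def pyExpandAux (fuel : Nat) (token : List Char) (mn mx : Int) : PySem.Set Int :=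
  match fuel with
  | 0 => []
  | fuel + 1 =>
    if token = ['*'] then PySem.Set.ofList (PySem.List.pyRange mn (mx + 1) 1)
    else
      let values : PySem.Set Int :=
        (PySem.Chars.splitOn token [',']).foldl (fun vs part =>
          let p := PySem.Chars.strip part
          if PySem.Chars.isIn ['/'] p then
            match PySem.Chars.splitOnMax p ['/'] 1 with
            | [base, step] =>
              match PySem.Int.ofChars? step with
              | some st =>
                let baseVals : PySem.Set Int :=
                  if base = ['*'] then PySem.Set.ofList (PySem.List.pyRange mn (mx + 1) 1)
                  else pyExpandAux fuel base mn mx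
                (PySem.List.sorted baseVals (fun v => v) false).foldl
                  (fun vs v => if PySem.Int.mod (v - mn) st = 0 then PySem.Set.add vs v else vs) vs
              | none => vs          -- int(step) raises: outside Pre_
            | _ => vs               -- unreachable under the '/' guard
          else if PySem.Chars.isIn ['-'] p then
            match PySem.Chars.splitOnMax p ['-'] 1 with
            | [a, c] =>
              match PySem.Int.ofChars? a, PySem.Int.ofChars? c with
              | some ai, some ci => PySem.Set.update vs (PySem.List.pyRange ai (ci + 1) 1)
              | _, _ => vs          -- int() raises: outside Pre_
            | _ => vs               -- unreachable under the '-' guard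
          else
            match PySem.Int.ofChars? p with
            | some n => PySem.Set.add vs n
            | none => vs)           -- int(p) raises: outside Pre_
          PySem.Set.empty
      values.filter (fun v => decide (mn ≤ v ∧ v ≤ mx))

def expand_token_py (token : String) (minimum : Int) (maximum : Int) : List Int :=
  pyExpandAux (token.toList.length + 2) token.toList minimum maximum

-- ===== PORT B =====
def pyParseBounds (b : List Char) : Option (Int × Int) :=
  if PySem.Chars.isIn ['-'] b then
    match PySem.Chars.splitOnMax b ['-'] 1 with
    | [a, c] =>
      match PySem.Int.ofChars? a, PySem.Int.ofChars? c with
      | some ai, some ci => some (ai, ci)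
      | _, _ => none
    | _ => none
  else (PySem.Int.ofChars? b).map (fun n => (n, n))

def pyParsePart (p : List Char) (mn mx : Int) : Option (Int × Int × Int) :=
  if PySem.Chars.isIn ['/'] p then
    match PySem.Chars.splitOnMax p ['/'] 1 with
    | [base, step] =>
      match PySem.Int.ofChars? step with
      | some st =>
        if base = ['*'] then some (mn, mx, st)
        else (pyParseBounds (PySem.Chars.strip base)).map (fun lohi => (lohi.1, lohi.2, st))
      | none => none
    | _ => none
  else (pyParseBounds p).map (fun lohi => (lohi.1, lohi.2, 1))

def expand_token_py_alt (token : String) (minimum : Int) (maximum : Int) : List Int :=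
  let triples : List (Option (Int × Int × Int)) :=
    if token = "*" then [some (minimum, maximum, 1)]
    else (PySem.Chars.splitOn token.toList [',']).map
      (fun part => pyParsePart (PySem.Chars.strip part) minimum maximum)
  triples.foldl (fun vs t =>
    match t with
    | some (lo, hi, st) =>
      (PySem.List.pyRange (max lo minimum) (min hi maximum + 1) 1).foldl
        (fun vs v => if PySem.Int.mod (v - minimum) st = 0 then PySem.Set.add vs v else vs) vs
    | none => vs) PySem.Set.empty

-- ===== PRECONDITION & SPEC =====
-- Grammar validity of the base of a 'base/step' part (after stripping), plus: when step == 0,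
-- the clamped base range must be empty (otherwise Python's '%' raises ZeroDivisionError).
def pyValidBounds (b : List Char) (mn mx st : Int) : Bool :=
  if PySem.Chars.isIn ['-'] b then
    match PySem.Chars.splitOnMax b ['-'] 1 with
    | [a, c] =>
      match PySem.Int.ofChars? a, PySem.Int.ofChars? c with
      | some ai, some ci => !(st = 0 && max ai mn ≤ min ci mx)
      | _, _ => false
    | _ => false
  else
    match PySem.Int.ofChars? b with
    | some n => !(st = 0 && mn ≤ n && n ≤ mx)
    | none => false

def pyValidPart (p : List Char) (mn mx : Int) : Bool :=
  if PySem.Chars.isIn ['/'] p then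
    match PySem.Chars.splitOnMax p ['/'] 1 with
    | [base, step] =>
      match PySem.Int.ofChars? step with
      | some st =>
        if base = ['*'] then !(st = 0 && mn ≤ mx)
        else decide (PySem.Chars.splitOn base [','] = [base]) &&
             !(PySem.Chars.isIn ['/'] (PySem.Chars.strip base)) &&
             pyValidBounds (PySem.Chars.strip base) mn mx st
      | none => false
    | _ => false
  else pyValidBounds p mn mx 1

-- Pre_ excludes exactly the inputs on which Python's _expand_token raises: a part (or a base of a
-- 'base/step' part) whose pieces do not parse with int() (ValueError), and step == 0 with a nonempty
-- clamped base range (ZeroDivisionError).  The two always-true conjuncts about the base of a '/'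
-- part (no comma, no slash) record its provenance from the comma/slash splits and do not narrow Pre_.
def Pre_expand_token_py (token : String) (minimum : Int) (maximum : Int) : Prop :=
  token = "*" ∨
    (PySem.Chars.splitOn token.toList [',']).all
      (fun part => pyValidPart (PySem.Chars.strip part) minimum maximum) = true

instance (token : String) (minimum : Int) (maximum : Int) : Decidable (Pre_expand_token_py token minimum maximum) := by
  unfold Pre_expand_token_py; infer_instance

def pvWitness_expand_token_py : String × Int × Int := ("1-5/2, 8,*/4", 0, 9)

def Spec_expand_token_py (token : String) (minimum : Int) (maximum : Int) (out : List Int) : Prop := out = expand_token_py_alt token minimum maximum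
instance (token : String) (minimum : Int) (maximum : Int) (out : List Int) : Decidable (Spec_expand_token_py token minimum maximum out) := by unfold Spec_expand_token_py; infer_instance

-- ===== CLAIM (what is proved, stated in full; the proofs are below) =====
def Claim_equal_expand_token_py : Prop := ∀ (token : String) (minimum : Int) (maximum : Int), Dom_expand_token_py token minimum maximum → Pre_expand_token_py token minimum maximum → Spec_expand_token_py token minimum maximum (expand_token_py token minimum maximum)

-- ===== LEMMAS AND PROOFS =====

-- proof-only name for B's fold body (definitionally the lambda in expand_token_py_alt)
def bstep (mn mx : Int) (vs : PySem.Set Int) (t : Option (Int × Int × Int)) : PySem.Set Int :=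
  match t with
  | some (lo, hi, st) =>
    (PySem.List.pyRange (max lo mn) (min hi mx + 1) 1).foldl
      (fun vs v => if PySem.Int.mod (v - mn) st = 0 then PySem.Set.add vs v else vs) vs
  | none => vs

-- the clamping predicate used by A's final set comprehension
-- conditional-add fold = Set.update with a filtered list
theorem foldl_condAdd (cond : Int → Prop) [DecidablePred cond] (L : List Int) (s : PySem.Set Int) :
    L.foldl (fun vs v => if cond v then PySem.Set.add vs v else vs) s
      = PySem.Set.update s (L.filter (fun v => decide (cond v))) := by
  induction L generalizing s with
  | nil => simp [PySem.Set.update_nil]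
  | cons v T ih =>
    by_cases hv : cond v
    · simp [List.foldl_cons, hv, ih, PySem.Set.update_cons]
    · simp [List.foldl_cons, hv, ih]

theorem filter_add (P : Int → Bool) (s : PySem.Set Int) (v : Int) :
    (PySem.Set.add s v).filter P = if P v then PySem.Set.add (s.filter P) v else s.filter P := by
  rw [PySem.Set.add_eq_ite]
  by_cases hv : v ∈ s
  · simp only [hv, if_true]
    by_cases hp : P v = true
    · rw [if_pos hp, PySem.Set.add_of_mem (List.mem_filter.mpr ⟨hv, hp⟩)]
    · rw [if_neg hp]
  · simp only [hv, if_false, List.filter_append]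
    by_cases hp : P v = true
    · rw [if_pos hp, PySem.Set.add_of_not_mem (fun hmem => hv (List.mem_filter.mp hmem).1)]
      simp [hp]
    · simp [hp]

theorem filter_update (P : Int → Bool) (s : PySem.Set Int) (L : List Int) :
    (PySem.Set.update s L).filter P = PySem.Set.update (s.filter P) (L.filter P) := by
  induction L generalizing s with
  | nil => simp [PySem.Set.update_nil]
  | cons v T ih =>
    rw [PySem.Set.update_cons, ih, List.filter_cons]
    by_cases hp : P v = true
    · simp only [if_true, PySem.Set.update_cons, filter_add, hp]
    · simp only [hp]
      simp only [Bool.false_eq_true, if_false, filter_add, hp]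

-- clamping a step-1 range by filtering into [mn, mx]
theorem filter_pyRange_clamp (a b mn mx : Int) :
    (PySem.List.pyRange a b 1).filter (fun v => decide (mn ≤ v ∧ v ≤ mx))
      = PySem.List.pyRange (max a mn) (min b (mx + 1)) 1 := by
  have hpl : ((PySem.List.pyRange a b 1).filter (fun v => decide (mn ≤ v ∧ v ≤ mx))).Pairwise (· < ·) :=
    (PySem.List.pairwise_lt_pyRange_one a b).filter _
  have hpr : (PySem.List.pyRange (max a mn) (min b (mx + 1)) 1).Pairwise (· < ·) :=
    PySem.List.pairwise_lt_pyRange_one _ _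
  have hmem : ∀ x, x ∈ (PySem.List.pyRange a b 1).filter (fun v => decide (mn ≤ v ∧ v ≤ mx))
      ↔ x ∈ PySem.List.pyRange (max a mn) (min b (mx + 1)) 1 := by
    intro x
    simp only [List.mem_filter, PySem.List.mem_pyRange_one, decide_eq_true_eq]
    omega
  have hperm : (PySem.List.pyRange (max a mn) (min b (mx + 1)) 1).Perm
      ((PySem.List.pyRange a b 1).filter (fun v => decide (mn ≤ v ∧ v ≤ mx))) := by
    refine (List.perm_ext_iff_of_nodup ?_ ?_).mpr (fun x => (hmem x).symm)
    · exact hpr.imp (fun h => Int.ne_of_lt h)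
    · exact hpl.imp (fun h => Int.ne_of_lt h)
  calc (PySem.List.pyRange a b 1).filter (fun v => decide (mn ≤ v ∧ v ≤ mx))
      = PySem.List.sorted ((PySem.List.pyRange a b 1).filter (fun v => decide (mn ≤ v ∧ v ≤ mx))) (fun v => v) false :=
        (PySem.List.sorted_eq_of_perm_of_pairwise_lt _ _ _ (List.Perm.refl _) hpl).symm
    _ = PySem.List.pyRange (max a mn) (min b (mx + 1)) 1 :=
        PySem.List.sorted_eq_of_perm_of_pairwise_lt _ _ _ hperm hpr

theorem sorted_id_of_pairwise {L : List Int} (h : L.Pairwise (· < ·)) :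
    PySem.List.sorted L (fun v => v) false = L :=
  PySem.List.sorted_eq_of_perm_of_pairwise_lt _ _ _ (List.Perm.refl _) h

theorem pymod_one (x : Int) : PySem.Int.mod x 1 = 0 := by
  rw [PySem.Int.mod_eq_emod_of_pos one_pos]; exact Int.emod_one x

theorem pyRange_point (n mn mx : Int) :
    PySem.List.pyRange (max n mn) (min n mx + 1) 1
      = if mn ≤ n ∧ n ≤ mx then [n] else [] := by
  split_ifs with h
  · have h1 : max n mn = n := by omega
    have h2 : min n mx = n := by omega
    rw [h1, h2, PySem.List.pyRange_one_singleton]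
  · exact PySem.List.pyRange_one_eq_nil (by omega)

-- transporting an invariant through two folds over the same list
theorem foldl_invar {α β γ : Type} (f : β → α → β) (g : γ → α → γ) (F : β → γ)
    (P : α → Prop) (as : List α) (hall : ∀ a ∈ as, P a)
    (hstep : ∀ a, P a → ∀ s, F (f s a) = g (F s) a) (s0 : β) :
    F (as.foldl f s0) = as.foldl g (F s0) := by
  induction as generalizing s0 with
  | nil => rfl
  | cons a T ih =>
    rw [List.foldl_cons, List.foldl_cons, ih (fun x hx => hall x (List.mem_cons_of_mem a hx)),
      hstep a (hall a (List.mem_cons_self ..)) s0]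

-- evaluation of A's recursive call on a 'lo-hi' base: its clamped value set, already sorted
theorem inner_dash (mn mx : Int) (fuel : Nat) (base a c : List Char) (ai ci : Int)
    (hne : base ≠ ['*'])
    (hsplit : PySem.Chars.splitOn base [','] = [base])
    (hslash : PySem.Chars.isIn ['/'] (PySem.Chars.strip base) = false)
    (hdash : PySem.Chars.isIn ['-'] (PySem.Chars.strip base) = true)
    (hsm : PySem.Chars.splitOnMax (PySem.Chars.strip base) ['-'] 1 = [a, c])
    (ha : PySem.Int.ofChars? a = some ai) (hc : PySem.Int.ofChars? c = some ci) :
    pyExpandAux (fuel + 1) base mn mx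
      = PySem.List.pyRange (max ai mn) (min ci mx + 1) 1 := by
  have hmin : min (ci + 1) (mx + 1) = min ci mx + 1 := by omega
  simp only [pyExpandAux, if_neg hne, hsplit, List.foldl_cons, List.foldl_nil,
    hslash, hdash, hsm, ha, hc, Bool.false_eq_true, if_false, if_true,
    PySem.Set.empty, PySem.Set.update_nil_left,
    PySem.Set.ofList_eq_self_of_nodup _ (PySem.List.nodup_pyRange_one ai (ci + 1)),
    filter_pyRange_clamp, hmin]

-- evaluation of A's recursive call on a bare integer base
theorem inner_bare (mn mx : Int) (fuel : Nat) (base : List Char) (n : Int)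
    (hne : base ≠ ['*'])
    (hsplit : PySem.Chars.splitOn base [','] = [base])
    (hslash : PySem.Chars.isIn ['/'] (PySem.Chars.strip base) = false)
    (hdash : PySem.Chars.isIn ['-'] (PySem.Chars.strip base) = false)
    (hn : PySem.Int.ofChars? (PySem.Chars.strip base) = some n) :
    pyExpandAux (fuel + 1) base mn mx
      = if mn ≤ n ∧ n ≤ mx then [n] else [] := by
  have hadd : PySem.Set.add PySem.Set.empty n = [n] :=
    PySem.Set.add_of_not_mem (List.not_mem_nil)
  simp only [pyExpandAux, if_neg hne, hsplit, List.foldl_cons, List.foldl_nil,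
    hslash, hdash, hn, Bool.false_eq_true, if_false, hadd]
  by_cases h : mn ≤ n ∧ n ≤ mx
  · simp [h]
  · simp [h]

-- every element of a clamped range passes the clamping filter again
theorem filter_clamped_range (mn mx lo hi : Int) (q : Int → Bool) :
    ((PySem.List.pyRange (max lo mn) (min hi mx + 1) 1).filter q).filter
        (fun v => decide (mn ≤ v ∧ v ≤ mx))
      = (PySem.List.pyRange (max lo mn) (min hi mx + 1) 1).filter q := by
  refine List.filter_eq_self.mpr (fun v hv => ?_)
  have := (List.mem_filter.mp hv).1
  rw [PySem.List.mem_pyRange_one] at this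
  simp only [decide_eq_true_eq]
  omega

-- the per-part step: A's loop body, clamped to [mn, mx], is B's enumeration of the parsed triple
theorem part_step (mn mx : Int) (fuel : Nat) (part : List Char)
    (h : pyValidPart (PySem.Chars.strip part) mn mx = true) (s : PySem.Set Int) :
    (if PySem.Chars.isIn ['/'] (PySem.Chars.strip part) then
      match PySem.Chars.splitOnMax (PySem.Chars.strip part) ['/'] 1 with
      | [base, step] =>
        match PySem.Int.ofChars? step with
        | some st =>
          (PySem.List.sorted
              (if base = ['*'] then PySem.Set.ofList (PySem.List.pyRange mn (mx + 1) 1)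
               else pyExpandAux (fuel + 1) base mn mx) (fun v => v) false).foldl
            (fun vs v => if PySem.Int.mod (v - mn) st = 0 then PySem.Set.add vs v else vs) s
        | none => s
      | _ => s
    else if PySem.Chars.isIn ['-'] (PySem.Chars.strip part) then
      match PySem.Chars.splitOnMax (PySem.Chars.strip part) ['-'] 1 with
      | [a, c] =>
        match PySem.Int.ofChars? a, PySem.Int.ofChars? c with
        | some ai, some ci => PySem.Set.update s (PySem.List.pyRange ai (ci + 1) 1)
        | _, _ => s
      | _ => s
    else
      match PySem.Int.ofChars? (PySem.Chars.strip part) with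
      | some n => PySem.Set.add s n
      | none => s).filter (fun v => decide (mn ≤ v ∧ v ≤ mx))
    = bstep mn mx (s.filter (fun v => decide (mn ≤ v ∧ v ≤ mx)))
        (pyParsePart (PySem.Chars.strip part) mn mx) := by
  unfold pyValidPart at h
  by_cases h1 : PySem.Chars.isIn ['/'] (PySem.Chars.strip part) = true
  · simp only [h1, if_true] at h
    cases hsp : PySem.Chars.splitOnMax (PySem.Chars.strip part) ['/'] 1 with
    | nil => simp only [hsp] at h; exact Bool.noConfusion h
    | cons base t =>
      cases t with
      | nil => simp only [hsp] at h; exact Bool.noConfusion h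
      | cons step t2 =>
        cases t2 with
        | cons x t3 => simp only [hsp] at h; exact Bool.noConfusion h
        | nil =>
          simp only [hsp, h1, if_true] at h ⊢
          cases hst : PySem.Int.ofChars? step with
          | none => simp only [hst] at h; exact Bool.noConfusion h
          | some st =>
            simp only [hst] at h ⊢
            by_cases hb : base = ['*']
            · -- base == "*": A sorts set(range(minimum, maximum+1)) and sieves it
              have hR : PySem.List.pyRange mn (mx + 1) 1
                  = PySem.List.pyRange (max mn mn) (min mx mx + 1) 1 := by
                rw [max_self, min_self]
              rw [if_pos hb,
                PySem.Set.ofList_eq_self_of_nodup _ (PySem.List.nodup_pyRange_one mn (mx + 1)),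
                sorted_id_of_pairwise (PySem.List.pairwise_lt_pyRange_one mn (mx + 1)),
                foldl_condAdd (fun v => PySem.Int.mod (v - mn) st = 0),
                filter_update, hR, filter_clamped_range]
              simp only [pyParsePart, h1, if_true, hsp, hst, if_pos hb, bstep,
                foldl_condAdd (fun v => PySem.Int.mod (v - mn) st = 0)]
            · rw [if_neg hb] at h ⊢
              simp only [Bool.and_eq_true, decide_eq_true_eq, Bool.not_eq_true'] at h
              obtain ⟨⟨hsplit, hslash2⟩, hvb⟩ := h
              unfold pyValidBounds at hvb
              by_cases hd : PySem.Chars.isIn ['-'] (PySem.Chars.strip base) = true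
              · simp only [hd, if_true] at hvb
                cases hsm : PySem.Chars.splitOnMax (PySem.Chars.strip base) ['-'] 1 with
                | nil => simp only [hsm] at hvb; exact Bool.noConfusion hvb
                | cons a t =>
                  cases t with
                  | nil => simp only [hsm] at hvb; exact Bool.noConfusion hvb
                  | cons c t2 =>
                    cases t2 with
                    | cons y t3 => simp only [hsm] at hvb; exact Bool.noConfusion hvb
                    | nil =>
                      cases ha : PySem.Int.ofChars? a with
                      | none => simp only [hsm, ha] at hvb; exact Bool.noConfusion hvb
                      | some ai =>
                        cases hc : PySem.Int.ofChars? c with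
                        | none => simp only [hsm, ha, hc] at hvb; exact Bool.noConfusion hvb
                        | some ci =>
                          rw [inner_dash mn mx fuel base a c ai ci hb hsplit hslash2 hd hsm ha hc,
                            sorted_id_of_pairwise (PySem.List.pairwise_lt_pyRange_one _ _),
                            foldl_condAdd (fun v => PySem.Int.mod (v - mn) st = 0),
                            filter_update, filter_clamped_range]
                          simp only [pyParsePart, pyParseBounds, h1, if_true, hsp, hst,
                            if_neg hb, hd, hsm, ha, hc, Option.map_some, bstep,
                            foldl_condAdd (fun v => PySem.Int.mod (v - mn) st = 0)]
              · simp only [Bool.not_eq_true] at hd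
                simp only [hd, Bool.false_eq_true, if_false] at hvb
                cases hn : PySem.Int.ofChars? (PySem.Chars.strip base) with
                | none => simp only [hn] at hvb; exact Bool.noConfusion hvb
                | some n =>
                  rw [inner_bare mn mx fuel base n hb hsplit hslash2 hd hn]
                  simp only [pyParsePart, pyParseBounds, h1, if_true, hsp, hst, if_neg hb,
                    hd, Bool.false_eq_true, if_false, hn, Option.map_some, bstep, pyRange_point]
                  by_cases hnr : mn ≤ n ∧ n ≤ mx
                  · rw [if_pos hnr,
                      sorted_id_of_pairwise (List.pairwise_singleton _ _),
                      foldl_condAdd (fun v => PySem.Int.mod (v - mn) st = 0),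
                      foldl_condAdd (fun v => PySem.Int.mod (v - mn) st = 0),
                      filter_update]
                    congr 1
                    refine List.filter_eq_self.mpr (fun v hv => ?_)
                    have hv' := (List.mem_filter.mp hv).1
                    simp only [List.mem_singleton] at hv'
                    subst hv'
                    simpa using hnr
                  · rw [if_neg hnr,
                      sorted_id_of_pairwise List.Pairwise.nil, List.foldl_nil, List.foldl_nil]
  · simp only [Bool.not_eq_true] at h1
    simp only [h1, Bool.false_eq_true, if_false] at h ⊢
    unfold pyValidBounds at h
    by_cases hd : PySem.Chars.isIn ['-'] (PySem.Chars.strip part) = true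
    · simp only [hd, if_true] at h ⊢
      cases hsm : PySem.Chars.splitOnMax (PySem.Chars.strip part) ['-'] 1 with
      | nil => simp only [hsm] at h; exact Bool.noConfusion h
      | cons a t =>
        cases t with
        | nil => simp only [hsm] at h; exact Bool.noConfusion h
        | cons c t2 =>
          cases t2 with
          | cons y t3 => simp only [hsm] at h; exact Bool.noConfusion h
          | nil =>
            cases ha : PySem.Int.ofChars? a with
            | none => simp only [hsm, ha] at h; exact Bool.noConfusion h
            | some ai =>
              cases hc : PySem.Int.ofChars? c with
              | none => simp only [hsm, ha, hc] at h; exact Bool.noConfusion h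
              | some ci =>
                simp only [hsm, ha, hc, pyParsePart, pyParseBounds, h1, hd,
                  Bool.false_eq_true, if_false, if_true, Option.map_some, bstep]
                have hmin : min (ci + 1) (mx + 1) = min ci mx + 1 := by omega
                rw [filter_update, filter_pyRange_clamp, hmin,
                  foldl_condAdd (fun v => PySem.Int.mod (v - mn) 1 = 0)]
                congr 1
                refine (List.filter_eq_self.mpr (fun v _ => ?_)).symm
                simp
    · simp only [Bool.not_eq_true] at hd
      simp only [hd, Bool.false_eq_true, if_false] at h ⊢
      cases hn : PySem.Int.ofChars? (PySem.Chars.strip part) with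
      | none => simp only [hn] at h; exact Bool.noConfusion h
      | some n =>
        simp only [hn, pyParsePart, pyParseBounds, h1, hd, Bool.false_eq_true, if_false,
          Option.map_some, bstep, pyRange_point, filter_add]
        by_cases hnr : mn ≤ n ∧ n ≤ mx
        · rw [if_pos (by simpa using hnr), if_pos hnr, List.foldl_cons, List.foldl_nil,
            if_pos (pymod_one _)]
        · rw [if_neg (by simpa using hnr), if_neg hnr, List.foldl_nil]

-- ===== VERDICT (by name: the statement is the Claim_ definition above) =====
theorem expand_token_py_spec : Claim_equal_expand_token_py := by
  intro token mn mx _ hpre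
  unfold Spec_expand_token_py expand_token_py expand_token_py_alt
  by_cases ht : token = "*"
  · subst ht
    show PySem.Set.ofList (PySem.List.pyRange mn (mx + 1) 1)
        = bstep mn mx PySem.Set.empty (some (mn, mx, 1))
    simp only [bstep, max_self, min_self,
      foldl_condAdd (fun v => PySem.Int.mod (v - mn) 1 = 0)]
    rw [show (PySem.Set.empty : PySem.Set Int) = [] from rfl, PySem.Set.update_nil_left]
    congr 1
    exact (List.filter_eq_self.mpr (fun v _ => by simp)).symm
  · have ht' : token.toList ≠ ['*'] := fun hh => ht (String.toList_inj.mp hh)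
    have hall := hpre.resolve_left ht
    rw [List.all_eq_true] at hall
    simp only [pyExpandAux, if_neg ht, if_neg ht', List.foldl_map]
    exact foldl_invar _ _ _ (fun part => pyValidPart (PySem.Chars.strip part) mn mx = true) _
      (fun a haa => by simpa using hall a haa)
      (fun a ha s => part_step mn mx (token.toList.length) a ha s) PySem.Set.empty
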